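-- pv_equiv track=rewrite | github.com/North101/ugit | ugit.py | is_ignored
-- ===== SOURCE A (Python) =====
-- def is_ignored(ignore: list[str], path: str, ignore_dot_files: bool):
--   if path in ignore:
--     return True
--
--   for ignore_path in ignore:
--     if ignore_path.endswith('/') and path.startswith(ignore_path):
--       return True
--
--   if ignore_dot_files:
--     for part in path.split('/'):
--       if part.startswith('.'):
--         return True
--
--   return False
-- ===== SOURCE B (Python) =====
-- def is_ignored(ignore: list[str], path: str, ignore_dot_files: bool):
--   # Index the patterns in a hash set once, then make a single left-to-right
--   # pass over path: a state machine flags '.' at a component start, and at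
--   # every '/' the prefix up to it is looked up in the set.
--   ig = set(ignore)
--   if path in ig:
--     return True
--   at_start = True
--   for i, c in enumerate(path):
--     if ignore_dot_files and at_start and c == '.':
--       return True
--     at_start = c == '/'
--     if at_start and path[:i + 1] in ig:
--       return True
--   return False
-- ===== Notes on version B (the rewrite author's own statement) =====
-- stated objective: alternative
-- what changed: B inverts the traversal: instead of scanning the ignore list once per pattern (and splitting the path for the dot test), it indexes ignore in a hash set once and makes a single state-machine pass over path, looking up each '/'-terminated prefix of path in the set and flagging '.' at component starts.
import Mathlib
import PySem

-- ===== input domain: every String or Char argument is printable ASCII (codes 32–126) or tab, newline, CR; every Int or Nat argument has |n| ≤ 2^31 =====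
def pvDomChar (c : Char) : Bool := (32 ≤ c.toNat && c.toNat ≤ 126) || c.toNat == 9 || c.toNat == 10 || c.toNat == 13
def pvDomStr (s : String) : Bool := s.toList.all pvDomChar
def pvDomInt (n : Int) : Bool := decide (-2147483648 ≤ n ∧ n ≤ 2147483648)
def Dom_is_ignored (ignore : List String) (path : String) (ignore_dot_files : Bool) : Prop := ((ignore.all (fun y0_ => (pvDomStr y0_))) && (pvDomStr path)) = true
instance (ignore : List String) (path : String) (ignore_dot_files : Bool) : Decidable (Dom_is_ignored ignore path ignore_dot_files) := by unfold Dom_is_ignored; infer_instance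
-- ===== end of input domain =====

-- B replaces A's per-pattern scan of `ignore` by one hash-set lookup per '/' during a single
-- state-machine pass over `path` (which also detects '.'-leading components without splitting);
-- same return value everywhere (objective: alternative).

-- ===== PORT A =====
-- `path.split('/')`: the separator is the nonempty literal "/", so Chars.splitOn on the code points is exact.
def is_ignored (ignore : List String) (path : String) (ignore_dot_files : Bool) : Bool :=
  if ignore.contains path then true
  else if ignore.any (fun ignore_path =>
      PySem.Str.endswith ignore_path "/" && PySem.Str.startswith path ignore_path) then true
  else if ignore_dot_files then
    (PySem.Chars.splitOn path.toList ['/']).any (fun part => PySem.Chars.startswith part ['.'])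
  else false

-- ===== PORT B =====
-- the loop: `pre` is the list of characters already consumed, so `pre ++ [c]` is path[:i+1].
def is_ignored_alt_go (ig : PySem.Set String) (ignore_dot_files : Bool) :
    List Char → Bool → List Char → Bool
  | [], _, _ => false
  | c :: rest, at_start, pre =>
    if ignore_dot_files && at_start && (c == '.') then true
    else
      let at_start' := c == '/'
      let pre' := pre ++ [c]
      if at_start' && PySem.Set.contains ig (String.ofList pre') then true
      else is_ignored_alt_go ig ignore_dot_files rest at_start' pre'

def is_ignored_alt (ignore : List String) (path : String) (ignore_dot_files : Bool) : Bool :=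
  let ig := PySem.Set.ofList ignore
  if PySem.Set.contains ig path then true
  else is_ignored_alt_go ig ignore_dot_files path.toList true []

-- ===== PRECONDITION & SPEC =====
def Spec_is_ignored (ignore : List String) (path : String) (ignore_dot_files : Bool) (out : Bool) : Prop := out = is_ignored_alt ignore path ignore_dot_files
instance (ignore : List String) (path : String) (ignore_dot_files : Bool) (out : Bool) : Decidable (Spec_is_ignored ignore path ignore_dot_files out) := by unfold Spec_is_ignored; infer_instance

-- ===== CLAIM (what is proved, stated in full; the proofs are below) =====
def Claim_equal_is_ignored : Prop := ∀ (ignore : List String) (path : String) (ignore_dot_files : Bool), Dom_is_ignored ignore path ignore_dot_files → Spec_is_ignored ignore path ignore_dot_files (is_ignored ignore path ignore_dot_files)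

-- ===== LEMMAS AND PROOFS =====

-- Proof-only views of B's single pass: the dot-state machine and the prefix lookups, separately.
def dscan : List Char → Bool → Bool
  | [], _ => false
  | c :: r, at_start => (at_start && (c == '.')) || dscan r (c == '/')

def pscan (ig : PySem.Set String) : List Char → List Char → Bool
  | [], _ => false
  | c :: r, pre =>
    ((c == '/') && PySem.Set.contains ig (String.ofList (pre ++ [c]))) || pscan ig r (pre ++ [c])

theorem go_eq_dscan_or_pscan (ig : PySem.Set String) (dot : Bool) :
    ∀ (l : List Char) (at_start : Bool) (pre : List Char),
      is_ignored_alt_go ig dot l at_start pre =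
        ((dot && dscan l at_start) || pscan ig l pre) := by
  intro l
  induction l with
  | nil => intro a p; simp [is_ignored_alt_go, dscan, pscan]
  | cons c r ih =>
    intro a p
    simp only [is_ignored_alt_go, dscan, pscan, ih]
    cases dot <;> cases a <;> cases h : (c == '.') <;> cases h2 : (c == '/') <;>
      simp [Bool.or_assoc, Bool.or_comm]

-- '.'-after-'/' detector: slashDot l = true iff "/." occurs in l.
def slashDot : List Char → Bool
  | [] => false
  | a :: r => (a == '/' && (r.head? == some '.')) || slashDot r

theorem dscan_eq (l : List Char) :
    ∀ at_start, dscan l at_start = ((at_start && (l.head? == some '.')) || slashDot l) := by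
  induction l with
  | nil => intro a; simp [dscan, slashDot]
  | cons c r ih =>
    intro a
    simp only [dscan, slashDot, ih, List.head?_cons]
    cases a <;> simp

theorem startswith_dot_eq (p : List Char) :
    PySem.Chars.startswith p ['.'] = (p.head? == some '.') := by
  cases p <;> simp [PySem.Chars.startswith, List.isPrefixOf] <;> exact eq_comm

-- Invariant for Chars.splitOn.go with separator ['/'].
theorem go_any_dot (fuel : Nat) :
    ∀ (l cur : List Char) (acc : List (List Char)), l.length ≤ fuel →
    (PySem.Chars.splitOn.go ['/'] fuel l cur acc).any
        (fun part => PySem.Chars.startswith part ['.'])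
      = (acc.any (fun part => PySem.Chars.startswith part ['.'])
         || (if cur = [] then (l.head? == some '.') else (cur.getLast? == some '.'))
         || slashDot l) := by
  induction fuel with
  | zero =>
    intro l cur acc h
    have hl : l = [] := List.length_eq_zero_iff.mp (Nat.le_zero.mp h)
    subst hl
    rw [PySem.Chars.splitOn.go.eq_def]
    simp [List.any_reverse, startswith_dot_eq, slashDot, List.head?_reverse]
    cases cur <;> simp [Bool.or_comm]
  | succ fuel ih =>
    intro l cur acc h
    cases l with
    | nil =>
      rw [PySem.Chars.splitOn.go.eq_def]
      simp [List.any_reverse, startswith_dot_eq, slashDot, List.head?_reverse]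
      cases cur <;> simp [Bool.or_comm]
    | cons c rest =>
      rw [PySem.Chars.splitOn.go.eq_def]
      simp only [List.length_cons, Nat.succ_le_succ_iff] at h
      by_cases hc : c = '/'
      · subst hc
        have hpre : List.isPrefixOf ['/'] ('/' :: rest) = true := by
          simp [List.isPrefixOf]
        simp only [hpre, if_true, List.length_singleton, List.drop_succ_cons, List.drop_zero]
        rw [ih _ _ _ h]
        simp [startswith_dot_eq, slashDot, List.head?_reverse]
        cases cur <;> simp <;> cases rest <;> simp [slashDot] <;> ac_rfl
      · have hpre : List.isPrefixOf ['/'] (c :: rest) = false := by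
          simp [List.isPrefixOf]; intro hh; exact hc hh.symm
        simp only [hpre, Bool.false_eq_true, if_false]
        rw [ih _ _ _ h]
        have hlast : (c :: cur).getLast? = if cur = [] then some c else cur.getLast? := by
          cases cur <;> simp [List.getLast?_cons_cons]
        simp only [hlast, slashDot]
        cases cur with
        | nil =>
          simp only [reduceCtorEq, if_false, List.head?_cons]
          have : (c == '/' && (rest.head? == some '.')) = false := by
            simp [hc]
          rw [this]; simp
        | cons d t =>
          have : (c == '/' && (rest.head? == some '.')) = false := by
            simp [hc]
          rw [this]; simp

-- A's split-and-scan dot test equals B's state-machine scan started at a component boundary.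
theorem split_any_dot (path : String) :
    (PySem.Chars.splitOn path.toList ['/']).any (fun part => PySem.Chars.startswith part ['.'])
      = dscan path.toList true := by
  unfold PySem.Chars.splitOn
  rw [go_any_dot _ _ _ _ (Nat.le_succ _), dscan_eq]
  simp

-- pscan finds exactly the nonempty '/'-terminated prefixes of l (extended by pre) that are in ig.
theorem pscan_iff (ig : PySem.Set String) :
    ∀ (l pre : List Char),
      pscan ig l pre = true ↔
        ∃ t : List Char, t ≠ [] ∧ t <+: l ∧ t.getLast? = some '/' ∧
          PySem.Set.contains ig (String.ofList (pre ++ t)) = true := by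
  intro l
  induction l with
  | nil =>
    intro pre
    simp only [pscan, Bool.false_eq_true, false_iff]
    rintro ⟨t, hne, hp, -, -⟩
    exact hne (List.prefix_nil.mp hp)
  | cons c r ih =>
    intro pre
    simp only [pscan, Bool.or_eq_true, Bool.and_eq_true, beq_iff_eq, ih]
    constructor
    · rintro (⟨rfl, hm⟩ | ⟨t, hne, hp, hl, hm⟩)
      · exact ⟨['/'], by simp, by simp, by simp, hm⟩
      · refine ⟨c :: t, by simp, List.cons_prefix_cons.mpr ⟨rfl, hp⟩, ?_, by simpa using hm⟩
        cases t with
        | nil => exact absurd rfl hne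
        | cons d t' => rw [List.getLast?_cons_cons]; exact hl
    · rintro ⟨t, hne, hp, hl, hm⟩
      cases t with
      | nil => exact absurd rfl hne
      | cons d t' =>
        obtain ⟨rfl, hp'⟩ := List.cons_prefix_cons.mp hp
        cases t' with
        | nil =>
          simp only [List.getLast?_singleton, Option.some.injEq] at hl
          exact Or.inl ⟨hl, by simpa using hm⟩
        | cons e t'' =>
          refine Or.inr ⟨e :: t'', by simp, hp', ?_, by simpa using hm⟩
          rw [List.getLast?_cons_cons] at hl
          exact hl

-- A's two scans of `ignore` (exact membership + '/'-pattern prefix test) match B's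
-- set lookup plus pscan over the path.
theorem scans_eq (ignore : List String) (path : String) :
    (ignore.contains path
      || ignore.any (fun ignore_path =>
           PySem.Str.endswith ignore_path "/" && PySem.Str.startswith path ignore_path))
    = (PySem.Set.contains (PySem.Set.ofList ignore) path
      || pscan (PySem.Set.ofList ignore) path.toList []) := by
  have hmem : ∀ s : String, PySem.Set.contains (PySem.Set.ofList ignore) s = ignore.contains s := by
    intro s
    rw [Bool.eq_iff_iff, PySem.Set.contains_iff, PySem.Set.mem_ofList, List.contains_iff_mem]
  rw [hmem]
  congr 1
  rw [Bool.eq_iff_iff, List.any_eq_true, pscan_iff]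
  constructor
  · rintro ⟨p, hpmem, hcond⟩
    rw [Bool.and_eq_true, PySem.Str.endswith_eq, PySem.Str.startswith_eq,
        PySem.Chars.endswith_iff, PySem.Chars.startswith_iff] at hcond
    obtain ⟨hsuf, hpref⟩ := hcond
    refine ⟨p.toList, ?_, hpref, ?_, ?_⟩
    · intro h0; rw [h0] at hsuf; simp at hsuf
    · obtain ⟨u, hu⟩ := hsuf
      rw [← hu]; simp
    · rw [hmem]
      simpa [List.contains_iff_mem] using hpmem
  · rintro ⟨t, hne, hp, hl, hm⟩
    refine ⟨String.ofList t, ?_, ?_⟩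
    · rw [hmem] at hm
      simpa [List.contains_iff_mem] using hm
    · rw [Bool.and_eq_true, PySem.Str.endswith_eq, PySem.Str.startswith_eq,
          PySem.Chars.endswith_iff, PySem.Chars.startswith_iff]
      constructor
      · obtain ⟨ys, rfl⟩ := List.getLast?_eq_some_iff.mp hl
        simp
      · simpa using hp

-- the purely boolean shape of the final goal, given that the two pattern scans agree
theorem bool_combine (a b sc ps dot d : Bool) (h : (a || b) = (sc || ps)) :
    (if a then true else if b then true else if dot then d else false)
      = (if sc then true else ((dot && d) || ps)) := by
  cases a <;> cases b <;> cases sc <;> cases ps <;> cases dot <;> cases d <;> simp_all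

-- unfolding B's port past the `let ig := …` binding
theorem alt_eq (ignore : List String) (path : String) (dot : Bool) :
    is_ignored_alt ignore path dot =
      (if PySem.Set.contains (PySem.Set.ofList ignore) path then true
       else is_ignored_alt_go (PySem.Set.ofList ignore) dot path.toList true []) := rfl

-- ===== VERDICT (by name: the statement is the Claim_ definition above) =====
theorem is_ignored_spec : Claim_equal_is_ignored := by
  intro ignore path ignore_dot_files _
  unfold Spec_is_ignored is_ignored
  rw [alt_eq, go_eq_dscan_or_pscan, split_any_dot]
  exact bool_combine _ _ _ _ _ _ (scans_eq ignore path)
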